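-- pv_equiv track=rewrite | github.com/rakuu-exe/titanengine | src/titanengine/web_app.py | make_local_notes
-- ===== SOURCE A (Python) =====
-- def first_sentences(text, limit=8):
--     text = " ".join((text or "").split())
--     if not text:
--         return []
--     parts = []
--     current = []
--     for word in text.split(" "):
--         current.append(word)
--         if word.endswith((".", "?", "!")):
--             sentence = " ".join(current).strip()
--             if len(sentence) > 24:
--                 parts.append(sentence)
--             current = []
--         if len(parts) >= limit:
--             break
--     if not parts and current:
--         parts.append(" ".join(current[:40]))
--     return parts[:limit]
--
-- def make_local_notes(title, text, note_type):
--     sentences = first_sentences(text, 10)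
--     definitions = [line.strip() for line in (text or "").splitlines() if ":" in line or " is " in line.lower()]
--     definitions = definitions[:5]
--     concepts = sentences[:5] or ["No readable text was extracted from this file yet."]
--     lines = [
--         f"# {title}",
--         "",
--         f"## Note Style",
--         f"- {note_type.replace('_', ' ').title()}",
--         "",
--         "## Key Concepts",
--     ]
--     lines.extend(f"- {item}" for item in concepts)
--     lines.extend(["", "## Main Explanation"])
--     lines.extend(f"- {item}" for item in sentences[:6])
--     lines.extend(["", "## Important Definitions"])
--     lines.extend(f"- {item}" for item in definitions or ["Review the source and add definitions while studying."])
--     lines.extend(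
--         [
--             "",
--             "## Possible Exam Questions",
--             "- What are the most important ideas in this material?",
--             "- Which definitions or formulas would be easy to confuse?",
--             "- How would you explain this topic to a classmate?",
--             "",
--             "## Summary",
--             f"- Local draft created from {len(text or '')} extracted characters. Add an API key in Settings for AI notes.",
--         ]
--     )
--     return "\n".join(lines)
-- ===== SOURCE B (Python) =====
-- def _pieces(text):
--     # character-level state machine: cut after a sentence-ending mark followed by a space
--     pieces = []
--     buf = ""
--     prev = ""
--     for ch in text:
--         if ch == " " and prev in ".?!":
--             pieces.append(buf)
--             buf = ""
--         else:
--             buf += ch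
--         prev = ch
--     pieces.append(buf)
--     return pieces
--
-- def first_sentences(text, limit=8):
--     text = " ".join((text or "").split())
--     if not text:
--         return []
--     pieces = _pieces(text)
--     terminated = text[-1] in ".?!"
--     candidates = pieces if terminated else pieces[:-1]
--     kept = [p for p in candidates if len(p) > 24][:limit]
--     if not kept and not terminated:
--         kept = [" ".join(pieces[-1].split(" ")[:40])]
--     return kept
--
-- def make_local_notes(title, text, note_type):
--     sentences = first_sentences(text, 10)
--     definitions = [line.strip() for line in (text or "").splitlines() if ":" in line or " is " in line.lower()][:5]
--     sections = [
--         ("Note Style", [note_type.replace("_", " ").title()]),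
--         ("Key Concepts", sentences[:5] or ["No readable text was extracted from this file yet."]),
--         ("Main Explanation", sentences[:6]),
--         ("Important Definitions", definitions or ["Review the source and add definitions while studying."]),
--         ("Possible Exam Questions", [
--             "What are the most important ideas in this material?",
--             "Which definitions or formulas would be easy to confuse?",
--             "How would you explain this topic to a classmate?",
--         ]),
--         ("Summary", [f"Local draft created from {len(text or '')} extracted characters. Add an API key in Settings for AI notes."]),
--     ]
--     lines = [f"# {title}"]
--     for heading, items in sections:
--         lines.append("")
--         lines.append(f"## {heading}")
--         lines.extend(f"- {item}" for item in items)
--     return "\n".join(lines)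
-- ===== Notes on version B (the rewrite author's own statement) =====
-- stated objective: alternative
-- what changed: first_sentences no longer accumulates words with in-loop filtering and an early break: after normalization it runs a character-level state machine that cuts the string after every sentence-ending mark followed by a space, then selects candidates by whether the text is terminated, filters by length and truncates in separate staged passes; the markdown is built by folding a section table instead of inline list building.
import Mathlib
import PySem

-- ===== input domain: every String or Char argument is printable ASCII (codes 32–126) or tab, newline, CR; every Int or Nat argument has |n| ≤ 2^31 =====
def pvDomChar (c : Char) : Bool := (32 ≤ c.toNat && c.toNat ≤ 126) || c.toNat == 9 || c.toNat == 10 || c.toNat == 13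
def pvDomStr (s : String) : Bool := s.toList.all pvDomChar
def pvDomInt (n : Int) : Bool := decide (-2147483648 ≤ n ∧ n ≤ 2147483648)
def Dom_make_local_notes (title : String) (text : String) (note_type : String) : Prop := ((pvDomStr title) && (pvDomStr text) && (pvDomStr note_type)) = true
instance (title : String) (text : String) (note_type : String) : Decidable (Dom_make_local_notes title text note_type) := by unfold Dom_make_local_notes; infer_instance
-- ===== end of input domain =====

-- B replaces A's word-accumulator loop (with in-loop filtering and early break) by a
-- character-level state machine that cuts after punctuation+space, followed by staged
-- filter/truncate passes, and builds the markdown by folding a section table (objective: alternative).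

-- str.title(), exact for the ASCII domain: a letter is uppercased when the previous
-- character is not a letter, lowercased otherwise; other characters pass through.
def pvTitle : Bool → List Char → List Char
  | _, [] => []
  | prevAlpha, c :: cs =>
    if PySem.Chars.isalpha c then
      (if prevAlpha then PySem.Chars.lowerChar c else PySem.Chars.upperChar c) :: pvTitle true cs
    else c :: pvTitle false cs

-- ===== PORT A =====

-- word.endswith((".", "?", "!"))
def pvPunct (w : List Char) : Bool :=
  PySem.Chars.endswith w ['.'] || PySem.Chars.endswith w ['?'] || PySem.Chars.endswith w ['!']

-- the for-loop of first_sentences: state (parts, current), `break` = early return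
def pvALoop (limit : Int) : List (List Char) → List (List Char) → List (List Char) → List (List Char) × List (List Char)
  | [], parts, current => (parts, current)
  | w :: ws, parts, current =>
    if pvPunct w then
      let sentence := PySem.Chars.strip (PySem.Chars.join [' '] (current ++ [w]))
      let parts' := if 24 < PySem.Chars.len sentence then parts ++ [sentence] else parts
      if limit ≤ PySem.List.len parts' then (parts', []) else pvALoop limit ws parts' []
    else
      if limit ≤ PySem.List.len parts then (parts, current ++ [w])
      else pvALoop limit ws parts (current ++ [w])

def pvFirstSentencesA (text : String) (limit : Int) : List (List Char) :=
  let t := PySem.Chars.join [' '] (PySem.Chars.split₀ (if text = "" then "" else text).toList)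
  if t = [] then []
  else
    let r := pvALoop limit (PySem.Chars.splitOn t [' ']) [] []
    let parts := if r.1 = [] ∧ r.2 ≠ [] then r.1 ++ [PySem.Chars.join [' '] (PySem.List.slice r.2 none (some 40))] else r.1
    PySem.List.slice parts none (some limit)

def make_local_notes (title : String) (text : String) (note_type : String) : String :=
  let sentences := pvFirstSentencesA text 10
  let t0 := if text = "" then "" else text
  let definitions := PySem.List.slice (((PySem.Chars.splitlines t0.toList).filter
      (fun ln => PySem.Chars.isIn [':'] ln || PySem.Chars.isIn " is ".toList (PySem.Chars.lower ln))).map PySem.Chars.strip) none (some 5)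
  let concepts :=
    if PySem.List.slice sentences none (some 5) = [] then ["No readable text was extracted from this file yet.".toList]
    else PySem.List.slice sentences none (some 5)
  let lines : List (List Char) :=
    ["# ".toList ++ title.toList, [], "## Note Style".toList,
     "- ".toList ++ pvTitle false (PySem.Chars.replace note_type.toList ['_'] [' ']),
     [], "## Key Concepts".toList]
    ++ concepts.map (fun i => "- ".toList ++ i)
    ++ [[], "## Main Explanation".toList]
    ++ (PySem.List.slice sentences none (some 6)).map (fun i => "- ".toList ++ i)
    ++ [[], "## Important Definitions".toList]
    ++ (if definitions = [] then ["Review the source and add definitions while studying.".toList] else definitions).map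
         (fun i => "- ".toList ++ i)
    ++ [[], "## Possible Exam Questions".toList,
        "- What are the most important ideas in this material?".toList,
        "- Which definitions or formulas would be easy to confuse?".toList,
        "- How would you explain this topic to a classmate?".toList,
        [], "## Summary".toList,
        "- Local draft created from ".toList ++ PySem.Int.toChars (PySem.Chars.len t0.toList)
          ++ " extracted characters. Add an API key in Settings for AI notes.".toList]
  String.ofList (PySem.Chars.join ['\n'] lines)

-- ===== PORT B =====

-- _pieces: character-level state machine; prev is the previous character as a
-- 0/1-character string (Python's `prev in ".?!"` is a substring test, exact via isIn)
def pvScan : List Char → List Char → List Char → List (List Char) → List (List Char)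
  | [], buf, _, pieces => pieces ++ [buf]
  | c :: cs, buf, prev, pieces =>
    if c = ' ' ∧ PySem.Chars.isIn prev ['.', '?', '!'] = true then
      pvScan cs [] [c] (pieces ++ [buf])
    else pvScan cs (buf ++ [c]) [c] pieces

def pvFirstSentencesB (text : String) (limit : Int) : List (List Char) :=
  let t := PySem.Chars.join [' '] (PySem.Chars.split₀ (if text = "" then "" else text).toList)
  if t = [] then []
  else
    let pieces := pvScan t [] [] []
    -- text[-1] exists because t is nonempty here
    let terminated := (PySem.List.pyGet? t (-1)).elim false (fun c => PySem.Chars.isIn [c] ['.', '?', '!'])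
    let candidates := if terminated then pieces else PySem.List.slice pieces none (some (-1))
    let kept := PySem.List.slice (candidates.filter (fun p => decide (24 < PySem.Chars.len p))) none (some limit)
    if kept = [] ∧ terminated = false then
      -- pieces is never empty: the scan always appends the final buffer
      [PySem.Chars.join [' '] (PySem.List.slice (PySem.Chars.splitOn ((PySem.List.pyGet? pieces (-1)).getD []) [' ']) none (some 40))]
    else kept

def make_local_notes_alt (title : String) (text : String) (note_type : String) : String :=
  let sentences := pvFirstSentencesB text 10
  let t0 := if text = "" then "" else text
  let definitions := PySem.List.slice (((PySem.Chars.splitlines t0.toList).filter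
      (fun ln => PySem.Chars.isIn [':'] ln || PySem.Chars.isIn " is ".toList (PySem.Chars.lower ln))).map PySem.Chars.strip) none (some 5)
  let sections : List (List Char × List (List Char)) :=
    [("Note Style".toList, [pvTitle false (PySem.Chars.replace note_type.toList ['_'] [' '])]),
     ("Key Concepts".toList,
       if PySem.List.slice sentences none (some 5) = [] then ["No readable text was extracted from this file yet.".toList]
       else PySem.List.slice sentences none (some 5)),
     ("Main Explanation".toList, PySem.List.slice sentences none (some 6)),
     ("Important Definitions".toList,
       if definitions = [] then ["Review the source and add definitions while studying.".toList] else definitions),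
     ("Possible Exam Questions".toList,
       ["What are the most important ideas in this material?".toList,
        "Which definitions or formulas would be easy to confuse?".toList,
        "How would you explain this topic to a classmate?".toList]),
     ("Summary".toList,
       ["Local draft created from ".toList ++ PySem.Int.toChars (PySem.Chars.len t0.toList)
          ++ " extracted characters. Add an API key in Settings for AI notes.".toList])]
  let lines := sections.foldl
    (fun acc s => acc ++ [[], "## ".toList ++ s.1] ++ s.2.map (fun i => "- ".toList ++ i))
    ["# ".toList ++ title.toList]
  String.ofList (PySem.Chars.join ['\n'] lines)

-- ===== PRECONDITION & SPEC =====
def Spec_make_local_notes (title : String) (text : String) (note_type : String) (out : String) : Prop := out = make_local_notes_alt title text note_type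
instance (title : String) (text : String) (note_type : String) (out : String) : Decidable (Spec_make_local_notes title text note_type out) := by unfold Spec_make_local_notes; infer_instance

-- ===== CLAIM (what is proved, stated in full; the proofs are below) =====
def Claim_equal_make_local_notes : Prop := ∀ (title : String) (text : String) (note_type : String), Dom_make_local_notes title text note_type → Spec_make_local_notes title text note_type (make_local_notes title text note_type)

-- ===== LEMMAS AND PROOFS =====

-- a "word": nonempty and whitespace-free (what split() produces)
def pvWord (w : List Char) : Prop := w ≠ [] ∧ ∀ c ∈ w, PySem.Chars.isspace c = false

-- recursive description of the sentence grouping: groups and trailing fragment from a pending current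
def pvGt : List (List Char) → List (List Char) → List (List (List Char)) × List (List Char)
  | current, [] => ([], current)
  | current, w :: ws =>
    if pvPunct w then
      let r := pvGt [] ws
      ((current ++ [w]) :: r.1, r.2)
    else pvGt (current ++ [w]) ws

theorem pvSuffixSingle (p c : Char) (ys : List Char) : [p] <:+ (ys ++ [c]) ↔ p = c := by
  constructor
  · rintro ⟨t, ht⟩
    have := congrArg List.getLast? ht
    rw [List.getLast?_concat, List.getLast?_concat] at this
    exact Option.some_inj.mp this
  · rintro rfl
    exact ⟨ys, rfl⟩

theorem pvIsInSingle (c : Char) (s : List Char) : PySem.Chars.isIn [c] s = (c ∈ s : Bool) := by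
  by_cases hc : c ∈ s
  · rw [(PySem.Chars.isIn_iff_infix _ _).mpr ((List.singleton_infix_iff _ _).mpr hc)]
    simp [hc]
  · rw [(PySem.Chars.isIn_eq_false_iff _ _).mpr (fun hin => hc ((List.singleton_infix_iff _ _).mp hin))]
    simp [hc]

theorem pvPunct_eq (w : List Char) (hw : w ≠ []) :
    ((PySem.List.pyGet? w (-1)).elim false (fun c => PySem.Chars.isIn [c] ['.', '?', '!'])) = pvPunct w := by
  rcases List.eq_nil_or_concat w with rfl | ⟨ys, c, rfl⟩
  · exact absurd rfl hw
  · rw [List.concat_eq_append, PySem.List.pyGet?_neg_one_append_singleton]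
    simp only [Option.elim, pvIsInSingle]
    unfold pvPunct
    simp only [PySem.Chars.endswith]
    have h3 : ∀ p : Char, ([p].isSuffixOf (ys ++ [c]) : Bool) = (p = c : Bool) := by
      intro p
      rcases Bool.eq_false_or_eq_true ([p].isSuffixOf (ys ++ [c])) with h | h <;> rw [h]
      · rw [eq_comm, decide_eq_true_iff]
        exact (pvSuffixSingle p c ys).mp (List.isSuffixOf_iff_suffix.mp h)
      · rw [eq_comm, decide_eq_false_iff_not]
        rintro rfl
        rw [List.isSuffixOf_iff_suffix.mpr ((pvSuffixSingle p p ys).mpr rfl)] at h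
        simp at h
    rw [h3, h3, h3]
    simp [List.mem_cons]
    by_cases h1 : c = '.' <;> by_cases h2 : c = '?' <;> by_cases h4 : c = '!' <;> simp [h1, h2, h4]
    all_goals (first | rfl | (rw [eq_comm]; simp [h1, h2, h4, eq_comm]))

theorem pvGoWords : ∀ (s cur : List Char) (acc : List (List Char)),
    (∀ c ∈ cur, PySem.Chars.isspace c = false) → (∀ w ∈ acc, pvWord w) →
    ∀ w ∈ PySem.Chars.split₀.go s cur acc, pvWord w := by
  intro s
  induction s with
  | nil =>
    intro cur acc hcur hacc w hw
    rw [PySem.Chars.split₀.go] at hw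
    split at hw
    · exact hacc w (List.mem_reverse.mp hw)
    · rcases List.mem_cons.mp (List.mem_reverse.mp hw) with h | h
      · subst h
        refine ⟨?_, fun c hc => hcur c (List.mem_reverse.mp hc)⟩
        simp_all [List.isEmpty_iff]
      · exact hacc w h
  | cons c rest ih =>
    intro cur acc hcur hacc w hw
    rw [PySem.Chars.split₀.go] at hw
    by_cases hsp : PySem.Chars.isspace c = true
    · rw [if_pos hsp] at hw
      by_cases hemp : cur.isEmpty = true
      · rw [if_pos hemp] at hw
        exact ih [] acc (by simp) hacc w hw
      · rw [if_neg hemp] at hw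
        refine ih [] (cur.reverse :: acc) (by simp) ?_ w hw
        intro u hu
        rcases List.mem_cons.mp hu with h | h
        · subst h
          refine ⟨?_, fun d hd => hcur d (List.mem_reverse.mp hd)⟩
          simp_all [List.isEmpty_iff]
        · exact hacc u h
    · rw [if_neg hsp] at hw
      refine ih (c :: cur) acc ?_ hacc w hw
      intro d hd
      rcases List.mem_cons.mp hd with h | h
      · subst h; exact Bool.eq_false_iff.mpr hsp
      · exact hcur d h

theorem pvSplit₀_words (s : List Char) : ∀ w ∈ PySem.Chars.split₀ s, pvWord w := by
  rw [PySem.Chars.split₀]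
  exact pvGoWords s [] [] (by simp) (by simp)

theorem pvJoin_eq_nil_iff (ws : List (List Char)) (h : ∀ w ∈ ws, pvWord w) :
    PySem.Chars.join [' '] ws = [] ↔ ws = [] := by
  cases ws with
  | nil => simp [PySem.Chars.join_nil]
  | cons w t =>
    cases t with
    | nil =>
      rw [PySem.Chars.join_singleton]
      constructor
      · intro hw; exact absurd hw (h w (by simp)).1
      · intro hw; cases hw
    | cons b t' =>
      rw [PySem.Chars.join_cons_cons]
      constructor
      · intro hw
        have := congrArg List.length hw
        simp at this
      · intro hw; cases hw

theorem pvJoin_getLast_clean : ∀ (ws : List (List Char)), (∀ w ∈ ws, pvWord w) → ws ≠ [] →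
    ∀ c, (PySem.Chars.join [' '] ws).getLast? = some c → PySem.Chars.isspace c = false := by
  intro ws
  induction ws with
  | nil => intro _ h; exact absurd rfl h
  | cons w t ih =>
    intro h _ c hc
    cases t with
    | nil =>
      rw [PySem.Chars.join_singleton] at hc
      exact (h w (by simp)).2 c (List.mem_of_getLast? hc)
    | cons b t' =>
      rw [PySem.Chars.join_cons_cons, List.append_assoc, List.getLast?_append] at hc
      have hne : PySem.Chars.join [' '] (b :: t') ≠ [] := by
        rw [ne_eq, pvJoin_eq_nil_iff _ (fun u hu => h u (by simp [hu]))]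
        simp
      obtain ⟨v, hv⟩ : ∃ v, (PySem.Chars.join [' '] (b :: t')).getLast? = some v := by
        rcases Option.eq_none_or_eq_some ((PySem.Chars.join [' '] (b :: t')).getLast?) with hn | hs
        · exact absurd (List.getLast?_eq_none_iff.mp hn) hne
        · exact hs
      rw [List.getLast?_append, hv] at hc
      simp only [Option.some_or, Option.some_inj] at hc
      exact ih (fun u hu => h u (by simp [hu])) (by simp) c (hc ▸ hv)

theorem pvStrip_join (ws : List (List Char)) (h : ∀ w ∈ ws, pvWord w) :
    PySem.Chars.strip (PySem.Chars.join [' '] ws) = PySem.Chars.join [' '] ws := by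
  cases hws : ws with
  | nil => simp [PySem.Chars.join_nil, PySem.Chars.strip, PySem.Chars.lstrip, PySem.Chars.rstrip]
  | cons w t =>
    subst hws
    set l := PySem.Chars.join [' '] (w :: t) with hl
    obtain ⟨hwne, hwcl⟩ := h w (by simp)
    obtain ⟨c0, w', rfl⟩ : ∃ c0 w', w = c0 :: w' := by
      cases w with
      | nil => exact absurd rfl hwne
      | cons a b => exact ⟨a, b, rfl⟩
    have hlhead : ∃ r, l = c0 :: r := by
      cases t with
      | nil => rw [hl, PySem.Chars.join_singleton]; exact ⟨w', rfl⟩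
      | cons b t' => rw [hl, PySem.Chars.join_cons_cons]; exact ⟨w' ++ [' '] ++ PySem.Chars.join [' '] (b :: t'), by simp⟩
    obtain ⟨r, hr⟩ := hlhead
    have hc0 : PySem.Chars.isspace c0 = false := hwcl c0 (by simp)
    rw [PySem.Chars.strip, PySem.Chars.lstrip, hr, List.dropWhile_cons, hc0]
    simp only [Bool.false_eq_true, if_false]
    rw [← hr]
    have hlne : l ≠ [] := by rw [hr]; simp
    obtain ⟨cl, hcl⟩ := Option.ne_none_iff_exists'.mp (fun hn => hlne (List.getLast?_eq_none_iff.mp hn))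
    have hclc : PySem.Chars.isspace cl = false := pvJoin_getLast_clean ((c0 :: w') :: t) h (by simp) cl hcl
    rw [PySem.Chars.rstrip]
    rw [← List.head?_reverse] at hcl
    obtain ⟨r', hr'⟩ : ∃ r', l.reverse = cl :: r' := by
      cases hx : l.reverse with
      | nil => rw [hx] at hcl; cases hcl
      | cons a b => rw [hx] at hcl; simp at hcl; subst hcl; exact ⟨b, rfl⟩
    rw [hr', List.dropWhile_cons, hclc]
    simp only [Bool.false_eq_true, if_false]
    rw [← hr', List.reverse_reverse]

theorem pvGoStepNil (sep cur : List Char) (acc : List (List Char)) (f : Nat) :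
    PySem.Chars.splitOn.go sep (f + 1) [] cur acc = (cur.reverse :: acc).reverse := rfl

theorem pvGoStepCons (sep cur : List Char) (c : Char) (rest : List Char) (acc : List (List Char)) (f : Nat) :
    PySem.Chars.splitOn.go sep (f + 1) (c :: rest) cur acc =
      if sep.isPrefixOf (c :: rest) then
        PySem.Chars.splitOn.go sep f (List.drop sep.length (c :: rest)) [] (cur.reverse :: acc)
      else PySem.Chars.splitOn.go sep f rest (c :: cur) acc := rfl

theorem pvGoWord : ∀ (w : List Char), (∀ c ∈ w, PySem.Chars.isspace c = false) →
    ∀ (l cur : List Char) (acc : List (List Char)) (fuel : Nat),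
    PySem.Chars.splitOn.go [' '] (fuel + w.length) (w ++ l) cur acc =
      PySem.Chars.splitOn.go [' '] fuel l (w.reverse ++ cur) acc := by
  intro w
  induction w with
  | nil => intro _ l cur acc fuel; simp
  | cons c w' ih =>
    intro hcl l cur acc fuel
    have hc : c ≠ ' ' := by
      intro hceq
      have := hcl c (by simp)
      rw [hceq] at this
      exact absurd this (by decide)
    have hfuel : fuel + (c :: w').length = (fuel + w'.length) + 1 := by simp; omega
    rw [hfuel, List.cons_append, pvGoStepCons]
    have hpre : [' '].isPrefixOf (c :: (w' ++ l)) = false := by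
      simp [List.isPrefixOf]
      exact fun h => absurd h.symm hc
    rw [hpre]
    simp only [Bool.false_eq_true, if_false]
    rw [ih (fun d hd => hcl d (by simp [hd])) l (c :: cur) acc fuel]
    simp

theorem pvGoWordNil (w : List Char) (hw : ∀ c ∈ w, PySem.Chars.isspace c = false)
    (cur : List Char) (acc : List (List Char)) (fuel : Nat) :
    PySem.Chars.splitOn.go [' '] (fuel + w.length) w cur acc =
      PySem.Chars.splitOn.go [' '] fuel [] (w.reverse ++ cur) acc := by
  have := pvGoWord w hw [] cur acc fuel
  simpa using this

theorem pvGoSep (rest cur : List Char) (acc : List (List Char)) (fuel : Nat) :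
    PySem.Chars.splitOn.go [' '] (fuel + 1) (' ' :: rest) cur acc =
      PySem.Chars.splitOn.go [' '] fuel rest [] (cur.reverse :: acc) := by
  rw [pvGoStepCons]
  have hpre : [' '].isPrefixOf (' ' :: rest) = true := by simp [List.isPrefixOf]
  rw [hpre]
  simp

theorem pvGoJoin : ∀ (ws : List (List Char)), (∀ w ∈ ws, pvWord w) → ws ≠ [] →
    ∀ (acc : List (List Char)) (fuel : Nat),
    PySem.Chars.splitOn.go [' '] (fuel + (PySem.Chars.join [' '] ws).length + 1)
        (PySem.Chars.join [' '] ws) [] acc = acc.reverse ++ ws := by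
  intro ws
  induction ws with
  | nil => intro _ h; exact absurd rfl h
  | cons w t ih =>
    intro h _ acc fuel
    cases t with
    | nil =>
      rw [PySem.Chars.join_singleton]
      have : fuel + w.length + 1 = (fuel + 1) + w.length := by omega
      rw [this]
      rw [pvGoWordNil w (h w (by simp)).2 [] acc (fuel + 1)]
      rw [pvGoStepNil]
      simp
    | cons b t' =>
      rw [PySem.Chars.join_cons_cons]
      have harr : fuel + (w ++ ([' '] ++ PySem.Chars.join [' '] (b :: t'))).length + 1
          = ((fuel + (PySem.Chars.join [' '] (b :: t')).length + 1) + 1) + w.length := by simp; omega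
      rw [List.append_assoc, harr]
      rw [pvGoWord w (h w (by simp)).2 _ [] acc _]
      rw [List.singleton_append, pvGoSep]
      have := ih (fun u hu => h u (by simp [hu])) (by simp) ((w.reverse ++ []).reverse :: acc) fuel
      rw [this]
      simp

theorem pvSplitOn_join (ws : List (List Char)) (h : ∀ w ∈ ws, pvWord w) (hne : ws ≠ []) :
    PySem.Chars.splitOn (PySem.Chars.join [' '] ws) [' '] = ws := by
  rw [PySem.Chars.splitOn]
  have := pvGoJoin ws h hne [] 0
  simpa using this

theorem pvALoop_take (ws : List (List Char)) (hws : ∀ w ∈ ws, pvWord w) :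
    ∀ (cur parts : List (List Char)), (∀ w ∈ cur, pvWord w) → parts.length < 10 →
      (pvALoop 10 ws parts cur).1 =
        (parts ++ ((pvGt cur ws).1.map (PySem.Chars.join [' '])).filter
          (fun s => decide (24 < PySem.Chars.len s))).take 10 := by
  induction ws with
  | nil =>
    intro cur parts _ hlt
    simp [pvALoop, pvGt, List.take_of_length_le (by omega : parts.length ≤ 10)]
  | cons w t ih =>
    intro cur parts hcur hlt
    have hwords : ∀ u ∈ cur ++ [w], pvWord u := by
      intro u hu
      rcases List.mem_append.mp hu with hh | hh
      · exact hcur u hh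
      · simp at hh; subst hh; exact hws u (by simp)
    unfold pvALoop
    simp only []
    rw [pvStrip_join (cur ++ [w]) hwords]
    by_cases hp : pvPunct w = true
    · rw [if_pos hp]
      by_cases hlen : (24 : Int) < PySem.Chars.len (PySem.Chars.join [' '] (cur ++ [w]))
      · simp only [if_pos hlen]
        by_cases hbrk : (10 : Int) ≤ PySem.List.len (parts ++ [PySem.Chars.join [' '] (cur ++ [w])])
        · rw [if_pos hbrk]
          have h10 : (parts ++ [PySem.Chars.join [' '] (cur ++ [w])]).length = 10 := by
            simp [PySem.List.len_eq] at hbrk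
            simp
            omega
          simp only [pvGt, hp, if_pos]
          rw [List.map_cons, List.filter_cons_of_pos (by simpa using hlen)]
          rw [show parts ++ PySem.Chars.join [' '] (cur ++ [w]) :: (((pvGt [] t).1.map (PySem.Chars.join [' '])).filter fun s => decide (24 < PySem.Chars.len s)) = (parts ++ [PySem.Chars.join [' '] (cur ++ [w])]) ++ (((pvGt [] t).1.map (PySem.Chars.join [' '])).filter fun s => decide (24 < PySem.Chars.len s)) by simp]
          rw [List.take_left' h10]
        · rw [if_neg hbrk]
          have hlt' : (parts ++ [PySem.Chars.join [' '] (cur ++ [w])]).length < 10 := by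
            simp [PySem.List.len_eq] at hbrk
            simp
            omega
          rw [ih (fun u hu => hws u (by simp [hu])) [] _ (by simp) hlt']
          simp only [pvGt, hp, if_pos]
          rw [List.map_cons, List.filter_cons_of_pos (by simpa using hlen)]
          simp
      · simp only [if_neg hlen]
        by_cases hbrk : (10 : Int) ≤ PySem.List.len parts
        · exfalso; simp [PySem.List.len_eq] at hbrk; omega
        · rw [if_neg hbrk]
          rw [ih (fun u hu => hws u (by simp [hu])) [] parts (by simp) hlt]
          simp only [pvGt, hp, if_pos]
          rw [List.map_cons, List.filter_cons_of_neg (by simpa using hlen)]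
    · rw [if_neg hp]
      have hbrk : ¬ (10 : Int) ≤ PySem.List.len parts := by
        simp [PySem.List.len_eq]; omega
      rw [if_neg hbrk]
      rw [ih (fun u hu => hws u (by simp [hu])) (cur ++ [w]) parts hwords hlt]
      simp only [pvGt, hp]
      simp

theorem pvALoop_tail (ws : List (List Char)) (hws : ∀ w ∈ ws, pvWord w) :
    ∀ (cur : List (List Char)), (∀ w ∈ cur, pvWord w) →
      ((pvGt cur ws).1.map (PySem.Chars.join [' '])).filter (fun s => decide (24 < PySem.Chars.len s)) = [] →
      pvALoop 10 ws [] cur = ([], (pvGt cur ws).2) := by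
  induction ws with
  | nil => intro cur _ _; simp [pvALoop, pvGt]
  | cons w t ih =>
    intro cur hcur hfil
    have hwords : ∀ u ∈ cur ++ [w], pvWord u := by
      intro u hu
      rcases List.mem_append.mp hu with hh | hh
      · exact hcur u hh
      · simp at hh; subst hh; exact hws u (by simp)
    unfold pvALoop
    simp only []
    rw [pvStrip_join (cur ++ [w]) hwords]
    by_cases hp : pvPunct w = true
    · simp only [pvGt, hp, if_pos] at hfil ⊢
      rw [List.map_cons] at hfil
      have hlen : ¬ (24 : Int) < PySem.Chars.len (PySem.Chars.join [' '] (cur ++ [w])) := by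
        intro hl
        rw [List.filter_cons_of_pos (by simpa using hl)] at hfil
        cases hfil
      simp only [if_neg hlen]
      have hbrk : ¬ (10 : Int) ≤ PySem.List.len ([] : List (List Char)) := by
        simp [PySem.List.len_eq]
      rw [if_neg hbrk]
      rw [List.filter_cons_of_neg (by simpa using hlen)] at hfil
      exact ih (fun u hu => hws u (by simp [hu])) [] (by simp) hfil
    · rw [if_neg hp]
      have hbrk : ¬ (10 : Int) ≤ PySem.List.len ([] : List (List Char)) := by
        simp [PySem.List.len_eq]
      rw [if_neg hbrk]
      simp only [pvGt, hp] at hfil ⊢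
      simp only [Bool.false_eq_true, if_false] at hfil ⊢
      exact ih (fun u hu => hws u (by simp [hu])) (cur ++ [w]) hwords hfil

theorem pvSlice10 (xs : List (List Char)) : PySem.List.slice xs none (some 10) = xs.take 10 := by
  rw [PySem.List.slice_to _ (by norm_num)]
  rfl

-- ===== B-side lemmas: the character scan computes the groups =====

-- join of a snoc (nonempty front)
theorem pvJoin_concat : ∀ (xs : List (List Char)) (y : List Char), xs ≠ [] →
    PySem.Chars.join [' '] (xs ++ [y]) = PySem.Chars.join [' '] xs ++ [' '] ++ y := by
  intro xs
  induction xs with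
  | nil => intro y h; exact absurd rfl h
  | cons x t ih =>
    intro y _
    cases t with
    | nil => rw [PySem.Chars.join_singleton]; simp [PySem.Chars.join_cons_cons, PySem.Chars.join_singleton]
    | cons b t' =>
      have hih := ih y (by simp)
      rw [List.cons_append] at hih
      simp only [List.cons_append]
      rw [PySem.Chars.join_cons_cons, hih, PySem.Chars.join_cons_cons]
      simp

-- scanning a whole nonempty space-free word: no cut, the word is appended to the buffer,
-- prev becomes its last character
theorem pvScan_word : ∀ (ys : List Char) (c : Char), (∀ d ∈ ys ++ [c], PySem.Chars.isspace d = false) →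
    ∀ (rest buf prev : List Char) (pieces : List (List Char)),
    pvScan (ys ++ [c] ++ rest) buf prev pieces = pvScan rest (buf ++ ys ++ [c]) [c] pieces := by
  intro ys
  induction ys with
  | nil =>
    intro c hcl rest buf prev pieces
    have hc : ¬ (c = ' ' ∧ PySem.Chars.isIn prev ['.', '?', '!'] = true) := by
      rintro ⟨rfl, -⟩
      exact absurd (hcl ' ' (by simp)) (by decide)
    simp only [List.nil_append, List.singleton_append, pvScan, if_neg hc, List.append_nil]
  | cons a ys' ih =>
    intro c hcl rest buf prev pieces
    have ha : ¬ (a = ' ' ∧ PySem.Chars.isIn prev ['.', '?', '!'] = true) := by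
      rintro ⟨rfl, -⟩
      exact absurd (hcl ' ' (by simp)) (by decide)
    show pvScan (a :: (ys' ++ [c] ++ rest)) buf prev pieces = _
    rw [show pvScan (a :: (ys' ++ [c] ++ rest)) buf prev pieces
        = pvScan (ys' ++ [c] ++ rest) (buf ++ [a]) [a] pieces by simp only [pvScan, if_neg ha]]
    rw [ih c (fun d hd => hcl d (by simp [List.mem_append] at hd ⊢; tauto)) rest (buf ++ [a]) [a] pieces]
    simp

-- scanning the space after a word whose last character is p
theorem pvScan_space (p : Char) (rest buf : List Char) (pieces : List (List Char)) :
    pvScan (' ' :: rest) buf [p] pieces =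
      if (p ∈ ['.', '?', '!'] : Bool) then pvScan rest [] [' '] (pieces ++ [buf])
      else pvScan rest (buf ++ [' ']) [' '] pieces := by
  by_cases hp : (p ∈ ['.', '?', '!'] : Bool) = true
  · simp [pvScan, pvIsInSingle]
  · simp [pvScan, pvIsInSingle]

-- pvPunct of a snoc is membership of the last character
theorem pvPunct_concat (ys : List Char) (c : Char) :
    pvPunct (ys ++ [c]) = (c ∈ ['.', '?', '!'] : Bool) := by
  rw [← pvPunct_eq (ys ++ [c]) (by simp), PySem.List.pyGet?_neg_one_append_singleton]
  simp only [Option.elim, pvIsInSingle]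

-- the buffer carried into the scan of the remaining words, given the pending current words
def pvBuf (cur : List (List Char)) : List Char :=
  if cur = [] then [] else PySem.Chars.join [' '] cur ++ [' ']

theorem pvBuf_word (cur : List (List Char)) (w : List Char) :
    pvBuf cur ++ w = PySem.Chars.join [' '] (cur ++ [w]) := by
  unfold pvBuf
  by_cases h : cur = []
  · subst h; simp [PySem.Chars.join_singleton]
  · rw [if_neg h, pvJoin_concat cur w h]

-- MAIN: the scan of the joined words produces the joined groups, plus the joined
-- trailing fragment when it is nonempty
theorem pvScan_join : ∀ (ws : List (List Char)), (∀ w ∈ ws, pvWord w) → ws ≠ [] →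
    ∀ (cur : List (List Char)) (pieces : List (List Char)) (prev : List Char),
    pvScan (PySem.Chars.join [' '] ws) (pvBuf cur) prev pieces =
      pieces ++ ((pvGt cur ws).1.map (PySem.Chars.join [' '])) ++
        (if (pvGt cur ws).2 = [] then [] else [PySem.Chars.join [' '] (pvGt cur ws).2]) := by
  intro ws
  induction ws with
  | nil => intro _ h; exact absurd rfl h
  | cons w t ih =>
    intro h _ cur pieces prev
    obtain ⟨hwne, hwcl⟩ := h w (by simp)
    obtain ⟨ys, c, rfl⟩ : ∃ ys c, w = ys ++ [c] := by
      rcases List.eq_nil_or_concat w with h | ⟨ys, c, h⟩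
      · exact absurd h hwne
      · exact ⟨ys, c, by rw [h, List.concat_eq_append]⟩
    cases t with
    | nil =>
      rw [PySem.Chars.join_singleton]
      have hsw := pvScan_word ys c hwcl [] (pvBuf cur) prev pieces
      simp only [List.append_nil] at hsw
      rw [hsw]
      rw [show pvScan [] (pvBuf cur ++ ys ++ [c]) [c] pieces = pieces ++ [pvBuf cur ++ ys ++ [c]] from rfl]
      have hbuf : pvBuf cur ++ ys ++ [c] = PySem.Chars.join [' '] (cur ++ [ys ++ [c]]) := by
        rw [List.append_assoc, pvBuf_word]
      simp only [pvGt]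
      by_cases hp : pvPunct (ys ++ [c]) = true
      · simp only [hp, if_pos, hbuf]
        simp
      · simp only [hp, Bool.false_eq_true, if_false]
        have hne : cur ++ [ys ++ [c]] ≠ [] := by simp
        simp [hne, hbuf]
    | cons b t' =>
      rw [PySem.Chars.join_cons_cons]
      rw [List.append_assoc, List.append_assoc]
      rw [show ys ++ ([c] ++ ([' '] ++ PySem.Chars.join [' '] (b :: t')))
          = ys ++ [c] ++ (' ' :: PySem.Chars.join [' '] (b :: t')) by simp]
      rw [pvScan_word ys c hwcl _ (pvBuf cur) prev pieces]
      rw [pvScan_space c _ _ _]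
      have hmemb : (c ∈ ['.', '?', '!'] : Bool) = pvPunct (ys ++ [c]) := (pvPunct_concat ys c).symm
      rw [hmemb]
      have hbuf : pvBuf cur ++ ys ++ [c] = PySem.Chars.join [' '] (cur ++ [ys ++ [c]]) := by
        rw [List.append_assoc, pvBuf_word]
      by_cases hp : pvPunct (ys ++ [c]) = true
      · rw [if_pos hp]
        have := ih (fun u hu => h u (by simp [hu])) (by simp) [] (pieces ++ [pvBuf cur ++ ys ++ [c]]) [' ']
        rw [show pvBuf [] = [] from rfl] at this
        rw [this]
        simp only [pvGt, hp, if_pos]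
        simp [hbuf]
      · rw [if_neg (by simp [hp])]
        have hb2 : pvBuf cur ++ ys ++ [c] ++ [' '] = pvBuf (cur ++ [ys ++ [c]]) := by
          rw [hbuf]
          unfold pvBuf
          rw [if_neg (by simp)]
        rw [hb2]
        have := ih (fun u hu => h u (by simp [hu])) (by simp) (cur ++ [ys ++ [c]]) pieces [' ']
        rw [this]
        simp only [pvGt, hp, Bool.false_eq_true, if_false]

-- the trailing fragment is empty iff the last word ends with sentence punctuation
theorem pvGt_tail_empty : ∀ (xs : List (List Char)) (w : List Char) (cur : List (List Char)),
    ((pvGt cur (xs ++ [w])).2 = [] ↔ pvPunct w = true) := by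
  intro xs
  induction xs with
  | nil =>
    intro w cur
    by_cases hp : pvPunct w = true
    · simp [pvGt, hp]
    · simp [pvGt, hp]
  | cons x xs' ih =>
    intro w cur
    rw [List.cons_append]
    by_cases hp : pvPunct x = true
    · simp only [pvGt, hp, if_pos]
      exact ih w []
    · simp only [pvGt, hp, Bool.false_eq_true, if_false]
      exact ih w (cur ++ [x])

-- words of the trailing fragment
theorem pvGt_tail_words : ∀ (ws cur : List (List Char)), (∀ w ∈ ws, pvWord w) → (∀ w ∈ cur, pvWord w) →
    ∀ w ∈ (pvGt cur ws).2, pvWord w := by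
  intro ws
  induction ws with
  | nil => intro cur _ hcur w hw; simpa [pvGt] using hcur w (by simpa [pvGt] using hw)
  | cons x t ih =>
    intro cur hws hcur w hw
    by_cases hp : pvPunct x = true
    · simp only [pvGt, hp, if_pos] at hw
      exact ih [] (fun u hu => hws u (by simp [hu])) (by simp) w hw
    · simp only [pvGt, hp, Bool.false_eq_true, if_false] at hw
      refine ih (cur ++ [x]) (fun u hu => hws u (by simp [hu])) ?_ w hw
      intro u hu
      rcases List.mem_append.mp hu with hh | hh
      · exact hcur u hh
      · simp at hh; subst hh; exact hws u (by simp)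

-- the last character of the joined words is the last character of the last word
theorem pvJoin_getLast? (xs : List (List Char)) (w : List Char) (hw : w ≠ []) :
    (PySem.Chars.join [' '] (xs ++ [w])).getLast? = w.getLast? := by
  cases xs with
  | nil => rw [List.nil_append, PySem.Chars.join_singleton]
  | cons x t =>
    rw [pvJoin_concat (x :: t) w (by simp), List.getLast?_append, List.getLast?_append]
    obtain ⟨v, hv⟩ : ∃ v, w.getLast? = some v := by
      rcases Option.eq_none_or_eq_some w.getLast? with hn | hs
      · exact absurd (List.getLast?_eq_none_iff.mp hn) hw
      · exact hs
    rw [hv]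
    simp

theorem pvFirstSentences_eq (text : String) :
    pvFirstSentencesA text 10 = pvFirstSentencesB text 10 := by
  unfold pvFirstSentencesA pvFirstSentencesB
  simp only []
  set words := PySem.Chars.split₀ (if text = "" then "" else text).toList with hwdef
  have hwords : ∀ w ∈ words, pvWord w := pvSplit₀_words _
  by_cases hw : words = []
  · rw [hw]
    rw [if_pos (by rw [PySem.Chars.join_nil]), if_pos (by rw [PySem.Chars.join_nil])]
  · rw [if_neg (fun hj => hw ((pvJoin_eq_nil_iff words hwords).mp hj)),
      if_neg (fun hj => hw ((pvJoin_eq_nil_iff words hwords).mp hj))]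
    rw [pvSplitOn_join words hwords hw]
    -- decompose the last word
    obtain ⟨zs, lw, hzs⟩ : ∃ zs lw, words = zs ++ [lw] := by
      rcases List.eq_nil_or_concat words with h | ⟨zs, lw, h⟩
      · exact absurd h hw
      · exact ⟨zs, lw, by rw [h, List.concat_eq_append]⟩
    have hlwword : pvWord lw := hwords lw (by simp [hzs])
    obtain ⟨ys, c, hlw⟩ : ∃ ys c, lw = ys ++ [c] := by
      rcases List.eq_nil_or_concat lw with h | ⟨ys, c, h⟩
      · exact absurd h hlwword.1
      · exact ⟨ys, c, by rw [h, List.concat_eq_append]⟩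
    -- pieces
    have hscan := pvScan_join words hwords hw [] [] []
    rw [show pvBuf [] = [] from rfl] at hscan
    set groups := (pvGt [] words).1 with hgdef
    set tl := (pvGt [] words).2 with htdef
    -- terminated = pvPunct lw
    have hterm : (PySem.List.pyGet? (PySem.Chars.join [' '] words) (-1)).elim false
        (fun d => PySem.Chars.isIn [d] ['.', '?', '!']) = pvPunct lw := by
      have hgl : (PySem.Chars.join [' '] words).getLast? = some c := by
        rw [hzs, pvJoin_getLast? zs lw hlwword.1, hlw, List.getLast?_concat]
      obtain ⟨pre, hpre⟩ : ∃ pre, PySem.Chars.join [' '] words = pre ++ [c] := by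
        rcases List.eq_nil_or_concat (PySem.Chars.join [' '] words) with h | ⟨pre, d, h⟩
        · rw [h] at hgl; cases hgl
        · rw [List.concat_eq_append] at h
          rw [h, List.getLast?_concat] at hgl
          exact ⟨pre, by rw [h, Option.some_inj.mp hgl]⟩
      rw [hpre, PySem.List.pyGet?_neg_one_append_singleton]
      simp only [Option.elim, pvIsInSingle]
      rw [hlw, pvPunct_concat]
    rw [hterm]
    -- tail emptiness
    have htail : (tl = []) ↔ pvPunct lw = true := by
      rw [htdef, hzs]; exact pvGt_tail_empty zs lw []
    set filtered := (groups.map (PySem.Chars.join [' '])).filter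
      (fun s => decide (24 < PySem.Chars.len s)) with hfdef
    by_cases hp : pvPunct lw = true
    · -- terminated: tail is empty, pieces = joined groups
      have htl : tl = [] := htail.mpr hp
      rw [hscan, htl, hp]
      simp only [reduceIte, List.append_nil, List.nil_append]
      rw [← hfdef]
      simp only [Bool.true_eq_false, and_false, if_false]
      simp only [pvSlice10]
      by_cases hf : filtered = []
      · rw [pvALoop_tail words hwords [] (by simp) hf]
        simp only [← htdef, htl]
        rw [hf]
        simp
      · have h1 : (pvALoop 10 words [] []).1 = filtered.take 10 := by
          rw [pvALoop_take words hwords [] [] (by simp) (by simp), hfdef, ← hgdef]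
          simp only [List.nil_append]
        have h2 : filtered.take 10 ≠ [] := by
          intro hemp
          rcases hfx : filtered with _ | ⟨a, b⟩
          · exact hf hfx
          · rw [hfx] at hemp; simp at hemp
        rw [if_neg (by rw [h1]; exact fun hc => h2 hc.1)]
        rw [h1]
        simp [List.take_take]
    · -- not terminated: tail nonempty, pieces = joined groups ++ [joined tail]
      have htl : tl ≠ [] := fun h => hp (htail.mp h)
      have hpf : pvPunct lw = false := by revert hp; cases pvPunct lw <;> simp
      rw [hscan, hpf, if_neg htl]
      simp only [Bool.false_eq_true, if_false, List.nil_append]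
      rw [PySem.List.slice_to_neg_one, List.dropLast_concat]
      rw [← hfdef]
      simp only [pvSlice10]
      simp only [and_true]
      by_cases hf : filtered = []
      · rw [pvALoop_tail words hwords [] (by simp) hf]
        simp only [← htdef]
        rw [hf]
        simp only [List.take_nil, reduceIte]
        rw [if_pos (⟨by trivial, htl⟩ : _ ∧ _)]
        rw [PySem.List.pyGet?_neg_one_append_singleton]
        simp only [Option.getD_some, List.nil_append]
        have htlw : ∀ u ∈ tl, pvWord u := by
          rw [htdef]
          exact pvGt_tail_words words [] hwords (by simp)
        rw [pvSplitOn_join tl htlw htl]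
        simp
      · have h1 : (pvALoop 10 words [] []).1 = filtered.take 10 := by
          rw [pvALoop_take words hwords [] [] (by simp) (by simp), hfdef, ← hgdef]
          simp only [List.nil_append]
        have h2 : filtered.take 10 ≠ [] := by
          intro hemp
          rcases hfx : filtered with _ | ⟨a, b⟩
          · exact hf hfx
          · rw [hfx] at hemp; simp at hemp
        rw [if_neg (by rw [h1]; exact fun hc => h2 hc.1)]
        rw [if_neg h2]
        rw [h1]
        simp [List.take_take]

-- ===== VERDICT (by name: the statement is the Claim_ definition above) =====
theorem make_local_notes_spec : Claim_equal_make_local_notes := by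
  intro title text note_type _
  unfold Spec_make_local_notes make_local_notes make_local_notes_alt
  rw [pvFirstSentences_eq]
  simp [List.foldl, List.append_assoc]
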